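-- pv_equiv track=rewrite | github.com/ksj6ftj8f8-Ganster/Dasein | Entity2/Entity2-main/REm/remforge_ultra_formato_optimo.py | _extract_micro_intentionalities
-- ===== SOURCE A (Python) =====
-- from typing import Dict, Any, List, Tuple, Optional, Union
--
-- def _extract_micro_intentionalities(clauses: List[Dict]) -> List[str]:
--     """Extrae micro-intencionalidades"""
--     micro_intents = []
--
--     for clause in clauses[:3]:
--         text = clause["text"].lower()
--
--         if "veo" in text or "observo" in text:
--             micro_intents.append("visual_inspection")
--         elif "siento" in text or "percibo" in text:
--             micro_intents.append("haptic_exploration")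
--         elif "escucho" in text or "oigo" in text:
--             micro_intents.append("auditory_attention")
--         elif "pienso" in text or "reflexiono" in text:
--             micro_intents.append("reflective_contemplation")
--
--     return micro_intents
-- ===== SOURCE B (Python) =====
-- from typing import Dict, Any, List, Tuple, Optional, Union
--
-- LABELS = ["visual_inspection", "haptic_exploration",
--           "auditory_attention", "reflective_contemplation"]
-- RANK = {"veo": 0, "observo": 0, "siento": 1, "percibo": 1,
--         "escucho": 2, "oigo": 2, "pienso": 3, "reflexiono": 3}
--
-- def _extract_micro_intentionalities(clauses: List[Dict]) -> List[str]:
--     def go(rest, budget):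
--         if budget == 0 or not rest:
--             return []
--         text = rest[0]["text"].lower()
--         hits = [rank for kw, rank in RANK.items() if kw in text]
--         tail = go(rest[1:], budget - 1)
--         return ([LABELS[min(hits)]] if hits else []) + tail
--     return go(clauses, 3)
-- ===== Notes on version B (the rewrite author's own statement) =====
-- stated objective: alternative
-- what changed: Instead of a short-circuiting elif chain (first-match-wins), B recursively walks the clauses with a budget, collects the ranks of ALL matching keywords from a flat keyword->rank map, and labels the clause by the minimum rank; correct because rank order equals the elif order.
import Mathlib
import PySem

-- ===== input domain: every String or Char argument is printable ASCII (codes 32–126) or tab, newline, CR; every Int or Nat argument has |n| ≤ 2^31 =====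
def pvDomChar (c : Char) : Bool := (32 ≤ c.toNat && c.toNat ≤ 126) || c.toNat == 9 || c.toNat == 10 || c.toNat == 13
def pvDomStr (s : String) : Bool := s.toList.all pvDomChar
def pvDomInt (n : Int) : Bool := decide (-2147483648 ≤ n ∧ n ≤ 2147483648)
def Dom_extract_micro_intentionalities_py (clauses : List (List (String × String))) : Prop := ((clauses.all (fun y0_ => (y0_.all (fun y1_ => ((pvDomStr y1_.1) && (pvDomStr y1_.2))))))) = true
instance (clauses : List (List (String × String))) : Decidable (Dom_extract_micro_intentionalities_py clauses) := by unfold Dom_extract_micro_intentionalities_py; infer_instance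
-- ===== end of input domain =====

-- B replaces A's short-circuiting elif chain and loop with a budgeted recursion that
-- collects the ranks of ALL matching keywords and takes the minimum (objective: alternative).

-- ===== PORT A =====
-- one iteration of A's for-loop: the elif chain, appending to the accumulator
def emiStepA (acc : List String) (clause : List (String × String)) : List String :=
  let text := PySem.Str.lower ((clause.lookup "text").getD "")   -- clause["text"]: Pre_ guarantees the key is present
  if PySem.Str.isIn "veo" text || PySem.Str.isIn "observo" text then acc ++ ["visual_inspection"]
  else if PySem.Str.isIn "siento" text || PySem.Str.isIn "percibo" text then acc ++ ["haptic_exploration"]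
  else if PySem.Str.isIn "escucho" text || PySem.Str.isIn "oigo" text then acc ++ ["auditory_attention"]
  else if PySem.Str.isIn "pienso" text || PySem.Str.isIn "reflexiono" text then acc ++ ["reflective_contemplation"]
  else acc

def extract_micro_intentionalities_py (clauses : List (List (String × String))) : List String :=
  (clauses.take 3).foldl emiStepA []

-- ===== PORT B =====
-- the LABELS list and the flat keyword -> rank map of Source B
def emiLabels : List String :=
  ["visual_inspection", "haptic_exploration", "auditory_attention", "reflective_contemplation"]

def emiRank : List (String × Int) :=
  [("veo", 0), ("observo", 0), ("siento", 1), ("percibo", 1),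
   ("escucho", 2), ("oigo", 2), ("pienso", 3), ("reflexiono", 3)]

-- the inner recursion go(rest, budget) of Source B
def emiGo : List (List (String × String)) → Nat → List String
  | _, 0 => []
  | [], _ => []
  | clause :: rest, Nat.succ budget =>
    let text := PySem.Str.lower ((clause.lookup "text").getD "")   -- clause["text"]: Pre_ guarantees the key is present
    let hits := emiRank.filterMap (fun p => if PySem.Str.isIn p.1 text then some p.2 else none)
    let tail := emiGo rest budget
    -- LABELS[min(hits)] : min? is none only when hits = [], guarded by the 'if hits' test;
    -- pyGet? is none never here (ranks are 0..3, |LABELS| = 4) — .toList is the faithful guard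
    (match hits.min? with
      | none => []
      | some r => (PySem.List.pyGet? emiLabels r).toList) ++ tail

def extract_micro_intentionalities_py_alt (clauses : List (List (String × String))) : List String :=
  emiGo clauses 3

-- ===== PRECONDITION & SPEC =====
-- Python A raises KeyError when one of the first three clauses lacks the "text" key; exactly those inputs are excluded.
def Pre_extract_micro_intentionalities_py (clauses : List (List (String × String))) : Prop :=
  ((clauses.take 3).all (fun c => (c.lookup "text").isSome)) = true
instance (clauses : List (List (String × String))) : Decidable (Pre_extract_micro_intentionalities_py clauses) := by
  unfold Pre_extract_micro_intentionalities_py; infer_instance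

def pvWitness_extract_micro_intentionalities_py : (List (List (String × String))) :=
  [[("text", "Veo la luz")], [("text", "nada")]]

def Spec_extract_micro_intentionalities_py (clauses : List (List (String × String))) (out : List String) : Prop := out = extract_micro_intentionalities_py_alt clauses
instance (clauses : List (List (String × String))) (out : List String) : Decidable (Spec_extract_micro_intentionalities_py clauses out) := by unfold Spec_extract_micro_intentionalities_py; infer_instance

-- ===== CLAIM (what is proved, stated in full; the proofs are below) =====
def Claim_equal_extract_micro_intentionalities_py : Prop := ∀ (clauses : List (List (String × String))), Dom_extract_micro_intentionalities_py clauses → Pre_extract_micro_intentionalities_py clauses → Spec_extract_micro_intentionalities_py clauses (extract_micro_intentionalities_py clauses)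

-- ===== LEMMAS AND PROOFS =====

-- the value A's elif chain contributes for one clause (proof-side restatement of the chain)
def emiChainList (text : String) : List String :=
  if PySem.Str.isIn "veo" text || PySem.Str.isIn "observo" text then ["visual_inspection"]
  else if PySem.Str.isIn "siento" text || PySem.Str.isIn "percibo" text then ["haptic_exploration"]
  else if PySem.Str.isIn "escucho" text || PySem.Str.isIn "oigo" text then ["auditory_attention"]
  else if PySem.Str.isIn "pienso" text || PySem.Str.isIn "reflexiono" text then ["reflective_contemplation"]
  else []

theorem emiStepA_chain (acc : List String) (clause : List (String × String)) :
    emiStepA acc clause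
      = acc ++ emiChainList (PySem.Str.lower ((clause.lookup "text").getD "")) := by
  simp only [emiStepA, emiChainList]
  split_ifs <;> simp

-- min-of-matching-ranks equals the first true branch of the elif chain
theorem emiMin_eq_chain (text : String) :
    (match (emiRank.filterMap (fun p =>
        if PySem.Str.isIn p.1 text then some p.2 else none)).min? with
      | none => ([] : List String)
      | some r => (PySem.List.pyGet? emiLabels r).toList)
      = emiChainList text := by
  unfold emiRank emiChainList
  simp only [List.filterMap_cons, List.filterMap_nil]
  generalize PySem.Str.isIn "veo" text = b1
  generalize PySem.Str.isIn "observo" text = b2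
  generalize PySem.Str.isIn "siento" text = b3
  generalize PySem.Str.isIn "percibo" text = b4
  generalize PySem.Str.isIn "escucho" text = b5
  generalize PySem.Str.isIn "oigo" text = b6
  generalize PySem.Str.isIn "pienso" text = b7
  generalize PySem.Str.isIn "reflexiono" text = b8
  revert b1 b2 b3 b4 b5 b6 b7 b8
  decide

-- per-clause agreement, combined
theorem emiStep_eq (acc : List String) (clause : List (String × String)) :
    emiStepA acc clause
      = acc ++
        (match (emiRank.filterMap (fun p =>
            if PySem.Str.isIn p.1 (PySem.Str.lower ((clause.lookup "text").getD "")) then some p.2 else none)).min? with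
          | none => []
          | some r => (PySem.List.pyGet? emiLabels r).toList) := by
  rw [emiStepA_chain, emiMin_eq_chain]

-- A's foldl over the first 'budget' clauses equals B's budgeted recursion
theorem emiFold_eq (l : List (List (String × String))) (b : Nat) (acc : List String) :
    (l.take b).foldl emiStepA acc = acc ++ emiGo l b := by
  induction l generalizing b acc with
  | nil => cases b <;> simp [emiGo]
  | cons c t ih =>
      cases b with
      | zero => simp [emiGo]
      | succ b =>
          simp only [List.take_succ_cons, List.foldl_cons, ih, emiStep_eq, emiGo,
            List.append_assoc]

-- ===== VERDICT (by name: the statement is the Claim_ definition above) =====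
theorem extract_micro_intentionalities_py_spec : Claim_equal_extract_micro_intentionalities_py := by
  intro clauses _ _
  unfold Spec_extract_micro_intentionalities_py extract_micro_intentionalities_py extract_micro_intentionalities_py_alt
  simpa using emiFold_eq clauses 3 []
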